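-- pv_equiv track=rewrite | github.com/gridvisi/Python_workspace | Zero 2 Hero Class/array/Nest/6 kyu Maximum Depth of Nested Brackets.py | strings_in_max_depth
-- ===== SOURCE A (Python) =====
-- def strings_in_max_depth(s):
--     m, n, r = 0, 0, ""
--     for c in s:
--         if m == n:
--             r += c
--         if c == '(':
--             if m == n:
--                 r, m = "", m+1
--             n += 1
--         elif c == ')':
--             n -= 1
--     return r[:-1].split(')') if r and r[-1] == ')' else [r]
-- ===== SOURCE B (Python) =====
-- def strings_in_max_depth(s):
--     # pass 1: compute the maximum bracket depth D ever reached
--     d = 0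
--     D = 0
--     for c in s:
--         if c == '(':
--             d += 1
--             if d > D:
--                 D = d
--         elif c == ')':
--             d -= 1
--     # pass 2: collect characters whose pre-update depth equals D
--     d = 0
--     parts = []
--     for c in s:
--         if d == D:
--             parts.append(c)
--         if c == '(':
--             d += 1
--         elif c == ')':
--             d -= 1
--     r = ''.join(parts)
--     return r[:-1].split(')') if r and r[-1] == ')' else [r]
-- ===== Notes on version B (the rewrite author's own statement) =====
-- stated objective: alternative
-- what changed: A's single loop that resets the collected buffer each time a new maximum depth is reached is replaced by two passes: pass 1 computes the maximum bracket depth D, pass 2 collects the characters whose pre-update depth equals D; the final split tail is unchanged.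
import Mathlib
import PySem

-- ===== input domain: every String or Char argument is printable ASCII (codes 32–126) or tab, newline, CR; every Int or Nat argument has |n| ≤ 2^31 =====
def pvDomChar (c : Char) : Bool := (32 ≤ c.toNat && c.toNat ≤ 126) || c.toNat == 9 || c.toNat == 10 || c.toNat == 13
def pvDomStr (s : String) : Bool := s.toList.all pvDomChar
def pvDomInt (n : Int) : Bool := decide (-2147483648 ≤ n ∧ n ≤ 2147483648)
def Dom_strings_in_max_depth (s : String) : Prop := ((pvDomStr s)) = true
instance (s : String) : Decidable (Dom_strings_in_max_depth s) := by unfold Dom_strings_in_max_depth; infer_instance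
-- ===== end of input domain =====

-- B replaces A's one-pass "reset the buffer whenever a new max depth is reached" loop by two
-- passes (pass 1 computes the max depth D, pass 2 collects the chars at depth D): alternative decomposition, same cost.

-- ===== PORT A =====
-- A's single loop over s with state (m = running max depth, n = current depth, r = collected chars)
def pvLoopA : List Char → Int → Int → List Char → Int × Int × List Char
  | [], m, n, r => (m, n, r)
  | c :: t, m, n, r =>
    let r1 := if m = n then r ++ [c] else r
    if c = '(' then
      if m = n then pvLoopA t (m + 1) (n + 1) []
      else pvLoopA t m (n + 1) r1
    else if c = ')' then pvLoopA t m (n - 1) r1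
    else pvLoopA t m n r1

def strings_in_max_depth (s : String) : List String :=
  let r := (pvLoopA s.toList 0 0 []).2.2
  -- r[:-1].split(')') if r and r[-1] == ')' else [r]
  if r ≠ [] ∧ PySem.List.pyGet? r (-1) = some ')' then
    (PySem.Chars.splitOn (PySem.List.slice r none (some (-1))) [')']).map String.ofList
  else [String.ofList r]

-- ===== PORT B =====
-- pass 1: state (current depth d, max depth D)
def pvPass1 : List Char → Int → Int → Int × Int
  | [], d, D => (d, D)
  | c :: t, d, D =>
    if c = '(' then pvPass1 t (d + 1) (if d + 1 > D then d + 1 else D)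
    else if c = ')' then pvPass1 t (d - 1) D
    else pvPass1 t d D

-- pass 2: collect characters whose pre-update depth equals D
def pvPass2 : List Char → Int → Int → List Char → List Char
  | [], _, _, r => r
  | c :: t, d, D, r =>
    let r1 := if d = D then r ++ [c] else r
    pvPass2 t (if c = '(' then d + 1 else if c = ')' then d - 1 else d) D r1

def strings_in_max_depth_alt (s : String) : List String :=
  let D := (pvPass1 s.toList 0 0).2
  let r := pvPass2 s.toList 0 D []
  if r ≠ [] ∧ PySem.List.pyGet? r (-1) = some ')' then
    (PySem.Chars.splitOn (PySem.List.slice r none (some (-1))) [')']).map String.ofList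
  else [String.ofList r]

-- ===== PRECONDITION & SPEC =====
def Spec_strings_in_max_depth (s : String) (out : List String) : Prop := out = strings_in_max_depth_alt s
instance (s : String) (out : List String) : Decidable (Spec_strings_in_max_depth s out) := by unfold Spec_strings_in_max_depth; infer_instance

-- ===== CLAIM (what is proved, stated in full; the proofs are below) =====
def Claim_equal_strings_in_max_depth : Prop := ∀ (s : String), Dom_strings_in_max_depth s → Spec_strings_in_max_depth s (strings_in_max_depth s)

-- ===== LEMMAS AND PROOFS =====

-- the running max of pass 1 never decreases
theorem pvPass1_ge (t : List Char) (d D : Int) : D ≤ (pvPass1 t d D).2 := by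
  induction t generalizing d D with
  | nil => simp [pvPass1]
  | cons c t ih =>
    simp only [pvPass1]
    split_ifs with h1 h2 h3
    · exact le_trans (by omega) (ih (d + 1) (d + 1))
    · exact le_trans (le_refl D) (ih (d + 1) D)
    · exact ih (d - 1) D
    · exact ih d D

-- main invariant: A's loop from state (m, n, r) with n ≤ m produces pass 1's final depth/max,
-- and its collected buffer is pass 2's (resumed from r if the max never moved, else from [])
theorem pvLoopA_eq (t : List Char) (m n : Int) (r : List Char) (h : n ≤ m) :
    pvLoopA t m n r =
      ((pvPass1 t n m).2, (pvPass1 t n m).1,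
        pvPass2 t n (pvPass1 t n m).2 (if (pvPass1 t n m).2 = m then r else [])) := by
  induction t generalizing m n r with
  | nil => simp [pvLoopA, pvPass1, pvPass2]
  | cons c t ih =>
    by_cases hp : c = '('
    · subst hp
      by_cases he : m = n
      · subst he
        have hg : (m : Int) + 1 > m := by omega
        have hge := pvPass1_ge t (m + 1) (m + 1)
        simp only [pvLoopA, pvPass1, pvPass2, reduceIte, if_pos hg]
        rw [ih (m + 1) (m + 1) [] (le_refl _)]
        have hMm : ¬ (pvPass1 t (m + 1) (m + 1)).2 = m := by omega
        have hnM : ¬ m = (pvPass1 t (m + 1) (m + 1)).2 := by omega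
        simp only [if_neg hMm, if_neg hnM, ite_self]
      · have hng : ¬ ((n : Int) + 1 > m) := by omega
        have hge := pvPass1_ge t (n + 1) m
        simp only [pvLoopA, pvPass1, pvPass2, reduceIte, if_neg he, if_neg hng]
        rw [ih m (n + 1) r (by omega)]
        have hnM : ¬ n = (pvPass1 t (n + 1) m).2 := by omega
        simp only [if_neg hnM]
    · by_cases hc : c = ')'
      · subst hc
        have hge := pvPass1_ge t (n - 1) m
        simp only [pvLoopA, pvPass1, pvPass2, reduceIte]
        rw [ih m (n - 1) (if m = n then r ++ [')'] else r) (by omega)]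
        by_cases hM : (pvPass1 t (n - 1) m).2 = m
        · by_cases he : m = n
          · subst he
            simp [hM]
          · have hn : ¬ n = (pvPass1 t (n - 1) m).2 := fun hh => he (by omega)
            simp only [if_neg hp, if_pos hM, if_neg he, if_neg hn]
        · have hn : ¬ n = (pvPass1 t (n - 1) m).2 := by omega
          simp only [if_neg hp, if_neg hM, if_neg hn]
      · have hge := pvPass1_ge t n m
        simp only [pvLoopA, pvPass1, pvPass2, if_neg hp, if_neg hc]
        rw [ih m n (if m = n then r ++ [c] else r) h]
        by_cases hM : (pvPass1 t n m).2 = m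
        · by_cases he : m = n
          · subst he
            simp [hM]
          · have hn : ¬ n = (pvPass1 t n m).2 := fun hh => he (by omega)
            simp only [if_pos hM, if_neg he, if_neg hn]
        · have hn : ¬ n = (pvPass1 t n m).2 := by omega
          simp only [if_neg hM, if_neg hn]

-- the buffers of the two ports coincide
theorem pvBuf_eq (t : List Char) :
    (pvLoopA t 0 0 []).2.2 = pvPass2 t 0 (pvPass1 t 0 0).2 [] := by
  rw [pvLoopA_eq t 0 0 [] (le_refl 0)]
  by_cases hM : (pvPass1 t 0 0).2 = 0 <;> simp [hM]

-- ===== VERDICT (by name: the statement is the Claim_ definition above) =====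
theorem strings_in_max_depth_spec : Claim_equal_strings_in_max_depth := by
  intro s _
  unfold Spec_strings_in_max_depth strings_in_max_depth strings_in_max_depth_alt
  rw [pvBuf_eq]
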